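-- pv_equiv track=rewrite | github.com/Kahavaki/Color_detection | Color_detection/picture copy.py | color_sort
-- ===== SOURCE A (Python) =====
-- def color_sort(frame):
--     colors = []
--     black_pxl = 0
--     for row in frame:
--             for i in row:
--                 if i[0] != 0 and i[1] != 0 and i[2] != 0:
--                     colors.append(i)
--                 else:
--                     black_pxl+=1
--     return colors, black_pxl
-- ===== SOURCE B (Python) =====
-- def color_sort(frame):
--     def is_color(p):
--         return all(p[k] != 0 for k in (0, 1, 2))
--
--     def solve(lo, hi):
--         if hi <= lo:
--             return [], 0
--         if hi - lo == 1:
--             row = frame[lo]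
--             kept = [p for p in row if is_color(p)]
--             return kept, len(row) - len(kept)
--         mid = (lo + hi) // 2
--         c1, b1 = solve(lo, mid)
--         c2, b2 = solve(mid, hi)
--         return c1 + c2, b1 + b2
--
--     return solve(0, len(frame))
-- ===== Notes on version B (the rewrite author's own statement) =====
-- stated objective: alternative
-- what changed: B is a divide-and-conquer over the row index range: leaves filter one row and count black pixels by subtraction, and sibling results are merged by concatenation and addition, instead of A's single nested loop with an if/else counter accumulator.
import Mathlib
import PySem

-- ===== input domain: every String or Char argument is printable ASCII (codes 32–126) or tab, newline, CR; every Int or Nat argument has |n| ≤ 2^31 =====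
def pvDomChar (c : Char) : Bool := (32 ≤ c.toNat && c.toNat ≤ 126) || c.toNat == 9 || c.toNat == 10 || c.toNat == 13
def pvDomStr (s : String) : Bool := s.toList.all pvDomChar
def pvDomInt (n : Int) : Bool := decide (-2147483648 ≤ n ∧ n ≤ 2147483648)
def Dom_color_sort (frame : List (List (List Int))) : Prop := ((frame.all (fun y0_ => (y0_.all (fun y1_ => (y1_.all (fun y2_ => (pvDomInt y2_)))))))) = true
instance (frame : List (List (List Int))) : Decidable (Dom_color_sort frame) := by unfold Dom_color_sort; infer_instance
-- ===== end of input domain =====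

-- B replaces A's single nested-loop if/else accumulator by a divide-and-conquer over the row
-- index range, counting black pixels by subtraction at the leaves (return values only; no mutation).

-- ===== PORT A =====
-- pixel test `i[0] != 0 and i[1] != 0 and i[2] != 0`; pyGetD 0 is exact wherever Python does
-- not raise (Pre_ below excludes the IndexError inputs, where the default branch is unreachable)
def pxA (i : List Int) : Bool :=
  (PySem.List.pyGetD i 0 0 != 0) && (PySem.List.pyGetD i 1 0 != 0) && (PySem.List.pyGetD i 2 0 != 0)

def color_sort (frame : List (List (List Int))) : List (List Int) × Int :=
  frame.foldl
    (fun acc row =>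
      row.foldl
        (fun (acc : List (List Int) × Int) i =>
          if pxA i then (acc.1 ++ [i], acc.2) else (acc.1, acc.2 + 1))
        acc)
    ([], 0)

-- ===== PORT B =====
-- `all(p[k] != 0 for k in (0, 1, 2))`: same short-circuit reads as A's `and` chain; pyGetD 0 is
-- exact wherever Python does not raise (Pre_ excludes the IndexError inputs)
def pxB (i : List Int) : Bool :=
  (PySem.List.pyGetD i 0 0 != 0) && (PySem.List.pyGetD i 1 0 != 0) && (PySem.List.pyGetD i 2 0 != 0)

-- `solve(lo, hi)`; frame[lo] at the leaf is in range (lo < hi ≤ len frame), so getD is exact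
def solveB (frame : List (List (List Int))) (lo hi : Nat) : List (List Int) × Int :=
  if hi ≤ lo then ([], 0)
  else if hi - lo = 1 then
    let row := frame.getD lo []
    let kept := row.filter pxB
    (kept, (row.length : Int) - (kept.length : Int))
  else
    let mid := (lo + hi) / 2
    let r1 := solveB frame lo mid
    let r2 := solveB frame mid hi
    (r1.1 ++ r2.1, r1.2 + r2.2)
termination_by hi - lo
decreasing_by all_goals omega

def color_sort_alt (frame : List (List (List Int))) : List (List Int) × Int :=
  solveB frame 0 frame.length

-- ===== PRECONDITION & SPEC =====
-- Pre_ excludes exactly the inputs where Python (both A and B) raises IndexError: a pixel shorter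
-- than 3 whose read channels are all non-zero (the short-circuit chain then reads past the end).
def Pre_color_sort (frame : List (List (List Int))) : Prop :=
  ∀ row ∈ frame, ∀ i ∈ row,
    3 ≤ i.length ∨ (1 ≤ i.length ∧ i.getD 0 1 = 0) ∨ (2 ≤ i.length ∧ i.getD 1 1 = 0)
instance (frame : List (List (List Int))) : Decidable (Pre_color_sort frame) := by
  unfold Pre_color_sort; infer_instance

def pvWitness_color_sort : List (List (List Int)) := [[[1, 2, 3], [0, 5, 5]], [[7, 0, 9]]]

def Spec_color_sort (frame : List (List (List Int))) (out : List (List Int) × Int) : Prop := out = color_sort_alt frame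
instance (frame : List (List (List Int))) (out : List (List Int) × Int) : Decidable (Spec_color_sort frame out) := by unfold Spec_color_sort; infer_instance

-- ===== CLAIM (what is proved, stated in full; the proofs are below) =====
def Claim_equal_color_sort : Prop := ∀ (frame : List (List (List Int))), Dom_color_sort frame → Pre_color_sort frame → Spec_color_sort frame (color_sort frame)

-- ===== LEMMAS AND PROOFS =====

-- A's nested fold over any prefix accumulator
theorem inner_fold (row : List (List Int)) (acc : List (List Int) × Int) :
    row.foldl
      (fun (acc : List (List Int) × Int) i =>
        if pxA i then (acc.1 ++ [i], acc.2) else (acc.1, acc.2 + 1)) acc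
    = (acc.1 ++ row.filter pxA,
       acc.2 + ((row.length : Int) - (row.filter pxA).length)) := by
  induction row generalizing acc with
  | nil => simp
  | cons a row ih =>
    simp only [List.foldl_cons]
    by_cases h : pxA a <;>
      · rw [ih]
        refine Prod.ext ?_ ?_ <;>
          · simp [List.filter_cons, h]
            try (push_cast; ring)

theorem outer_fold (frame : List (List (List Int))) (acc : List (List Int) × Int) :
    frame.foldl
      (fun acc row =>
        row.foldl
          (fun (acc : List (List Int) × Int) i =>
            if pxA i then (acc.1 ++ [i], acc.2) else (acc.1, acc.2 + 1)) acc) acc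
    = (acc.1 ++ frame.flatMap (fun row => row.filter pxA),
       acc.2 + (((frame.map (fun row => (row.length : Int))).sum)
                 - ((frame.flatMap (fun row => row.filter pxA)).length : Int))) := by
  induction frame generalizing acc with
  | nil => simp
  | cons r frame ih =>
    rw [List.foldl_cons, inner_fold, ih]
    refine Prod.ext ?_ ?_
    · simp [List.flatMap_cons]
    · simp [List.flatMap_cons, List.length_flatMap]
      push_cast
      ring

-- the row segment [lo, hi)
def seg (frame : List (List (List Int))) (lo hi : Nat) : List (List (List Int)) :=
  (frame.drop lo).take (hi - lo)

theorem seg_split (frame : List (List (List Int))) (lo mid hi : Nat)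
    (h1 : lo ≤ mid) (h2 : mid ≤ hi) :
    seg frame lo hi = seg frame lo mid ++ seg frame mid hi := by
  unfold seg
  have hk : hi - lo = (mid - lo) + (hi - mid) := by omega
  have hd : List.drop (mid - lo) (List.drop lo frame) = List.drop mid frame := by
    rw [List.drop_drop]; congr 1; omega
  rw [hk, List.take_add, hd]

theorem seg_one (frame : List (List (List Int))) (lo hi : Nat)
    (h1 : hi - lo = 1) (h2 : hi ≤ frame.length) :
    seg frame lo hi = [frame.getD lo []] := by
  unfold seg
  rw [h1]
  have hlt : lo < frame.length := by omega
  rw [List.getD_eq_getElem frame [] hlt]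
  rw [List.take_one, List.head?_drop, List.getElem?_eq_getElem hlt]
  simp

-- B's divide-and-conquer computes filter + subtraction over the segment
theorem solveB_seg (frame : List (List (List Int))) (lo hi : Nat)
    (hhi : hi ≤ frame.length) :
    solveB frame lo hi
    = ((seg frame lo hi).flatMap (fun row => row.filter pxB),
       (((seg frame lo hi).map (fun row => (row.length : Int))).sum)
         - (((seg frame lo hi).flatMap (fun row => row.filter pxB)).length : Int)) := by
  suffices H : ∀ n lo hi, hi - lo ≤ n → hi ≤ frame.length →
      solveB frame lo hi
      = ((seg frame lo hi).flatMap (fun row => row.filter pxB),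
         (((seg frame lo hi).map (fun row => (row.length : Int))).sum)
           - (((seg frame lo hi).flatMap (fun row => row.filter pxB)).length : Int)) by
    exact H (hi - lo) lo hi le_rfl hhi
  intro n
  induction n with
  | zero =>
    intro lo hi hle hhi
    have h : hi ≤ lo := by omega
    rw [solveB]
    have hseg : seg frame lo hi = [] := by
      have hz : hi - lo = 0 := by omega
      simp [seg, hz]
    simp [h, hseg]
  | succ n ih =>
    intro lo hi hle hhi
    rw [solveB]
    by_cases h : hi ≤ lo
    · have hseg : seg frame lo hi = [] := by
        have hz : hi - lo = 0 := by omega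
        simp [seg, hz]
      simp [h, hseg]
    · by_cases h1 : hi - lo = 1
      · simp only [h, if_false, h1, if_true]
        rw [seg_one frame lo hi h1 hhi]
        simp
      · simp only [h, if_false, h1, if_false]
        have hm1 : (lo + hi) / 2 - lo ≤ n := by omega
        have hm2 : hi - (lo + hi) / 2 ≤ n := by omega
        rw [ih lo ((lo + hi) / 2) hm1 (by omega), ih ((lo + hi) / 2) hi hm2 hhi]
        rw [seg_split frame lo ((lo + hi) / 2) hi (by omega) (by omega)]
        refine Prod.ext ?_ ?_
        · simp [List.flatMap_append]
        · simp [List.flatMap_append]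
          ring

-- ===== VERDICT (by name: the statement is the Claim_ definition above) =====
theorem color_sort_spec : Claim_equal_color_sort := by
  intro frame _ _
  show color_sort frame = color_sort_alt frame
  unfold color_sort color_sort_alt
  rw [outer_fold, solveB_seg frame 0 frame.length (le_refl _)]
  have hseg : seg frame 0 frame.length = frame := by unfold seg; simp
  have hpx : pxA = pxB := rfl
  simp [hseg, hpx]
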